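-- pv_equiv track=rewrite | github.com/nathanzhu144/practices | fizzbuzz/1181_before_and_after.py | beforeAndAfterPuzzles
-- ===== SOURCE A (Python) =====
-- import collections
--
-- def beforeAndAfterPuzzles(phrases):
--     """
--     :type phrases: List[str]
--     :rtype: List[str]
--     """
--     # DS
--     # front mapping "front" word of each phrase to a list of pairs (rest of phrase, idx)
--     # back mapping "back" word of each phrase to a list of pairs (rest of phrase, idx)
--     #
--     # idx is to ensrue we don't combine same phrase with itself.
--
--     front, back = collections.defaultdict(list), collections.defaultdict(list)
--     for idx in range(len(phrases)):
--         temp = phrases[idx].split()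
--         first_word = temp[0]
--         first_word_map = " ".join(temp[1:])     # First word map DOESN'T include connecting word
--
--         last_word = temp[-1]
--         last_word_map = " ".join(temp[:])       # Last word map DOES include connecting word.
--
--         front[first_word].append((first_word_map, idx))
--         back[last_word].append((last_word_map, idx))
--
--
--     ret = set()
--     for back_word in back:
--         for back_phrase, back_phrase_idx in back[back_word]:
--             for front_phrase, front_phrase_idx in front[back_word]:
--                 # this check is to see if we combine a phrase with itself
--                 if back_phrase_idx != front_phrase_idx:
--                     # Point if this is suppose we have ["a", "a"] -> should be "a" when combined, not "a "
--                     if not front_phrase: ret.add(back_phrase)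
--                     else: ret.add(back_phrase + " " + front_phrase)
--
--
--     return sorted([r for r in ret])
-- ===== SOURCE B (Python) =====
-- def beforeAndAfterPuzzles(phrases):
--     """
--     :type phrases: List[str]
--     :rtype: List[str]
--     """
--     splits = [p.split() for p in phrases]
--     res = set()
--     for i, a in enumerate(splits):
--         for j, b in enumerate(splits):
--             if i != j and a[-1] == b[0]:
--                 res.add(" ".join(a + b[1:]))
--     return sorted(res)
-- ===== Notes on version B (the rewrite author's own statement) =====
-- stated objective: simpler
-- what changed: Drops the front/back defaultdict index tables and the triple-nested dict iteration; B splits each phrase once and scans all ordered index pairs directly, joining the two split lists with a single ' '.join.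
import Mathlib
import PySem

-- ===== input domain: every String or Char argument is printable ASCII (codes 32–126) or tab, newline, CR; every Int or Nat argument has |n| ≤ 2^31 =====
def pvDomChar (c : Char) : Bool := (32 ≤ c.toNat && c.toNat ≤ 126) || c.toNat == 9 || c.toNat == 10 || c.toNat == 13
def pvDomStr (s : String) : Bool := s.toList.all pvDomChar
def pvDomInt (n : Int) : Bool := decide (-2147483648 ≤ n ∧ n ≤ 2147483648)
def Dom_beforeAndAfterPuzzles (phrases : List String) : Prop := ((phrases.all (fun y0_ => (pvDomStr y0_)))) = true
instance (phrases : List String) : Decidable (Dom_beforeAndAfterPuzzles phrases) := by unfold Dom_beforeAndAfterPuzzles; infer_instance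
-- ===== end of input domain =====

-- B drops A's front/back defaultdict tables and triple-nested dict iteration for a direct
-- scan over ordered index pairs of the pre-split phrases (same value, no speed claim).

-- ===== PORT A =====
-- port of A; temp[0]/temp[-1] raise IndexError on an empty split (excluded by Pre_), here headD/getLastD ""
def beforeAndAfterPuzzles (phrases : List String) : List String :=
  let fb := (PySem.List.enumerate phrases).foldl
      (fun (fb : PySem.Dict String (List (String × Int)) × PySem.Dict String (List (String × Int))) p =>
        (fb.1.modify ((PySem.Str.split₀ p.2).headD "") []
            (· ++ [(PySem.Str.join " " ((PySem.Str.split₀ p.2).drop 1), p.1)]),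
         fb.2.modify ((PySem.Str.split₀ p.2).getLastD "") []
            (· ++ [(PySem.Str.join " " (PySem.Str.split₀ p.2), p.1)])))
      (PySem.Dict.empty, PySem.Dict.empty)
  let ret := fb.2.keys.foldl (fun ret back_word =>
      (fb.2.getD back_word []).foldl (fun (ret : PySem.Set String) bp =>
        (fb.1.getD back_word []).foldl (fun (ret : PySem.Set String) fp =>
          if bp.2 ≠ fp.2 then
            (if fp.1 = "" then ret.add bp.1 else ret.add (bp.1 ++ " " ++ fp.1))
          else ret) ret) ret)
    PySem.Set.empty
  PySem.List.sorted ret id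

-- ===== PORT B =====
def beforeAndAfterPuzzles_alt (phrases : List String) : List String :=
  let splits := phrases.map PySem.Str.split₀
  let res := (PySem.List.enumerate splits).foldl (fun res p =>
      (PySem.List.enumerate splits).foldl (fun (res : PySem.Set String) q =>
        if p.1 ≠ q.1 ∧ p.2.getLastD "" = q.2.headD "" then
          res.add (PySem.Str.join " " (p.2 ++ q.2.drop 1))
        else res) res)
    PySem.Set.empty
  PySem.List.sorted res id

-- ===== PRECONDITION & SPEC =====
-- Pre_ excludes inputs where some phrase splits to nothing (empty/whitespace-only): there A raises IndexError.
def Pre_beforeAndAfterPuzzles (phrases : List String) : Prop :=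
  ∀ s ∈ phrases, PySem.Str.split₀ s ≠ []
instance (phrases : List String) : Decidable (Pre_beforeAndAfterPuzzles phrases) := by
  unfold Pre_beforeAndAfterPuzzles; infer_instance
def pvWitness_beforeAndAfterPuzzles : List String := ["cat dog", "dog run fast", "run"]

def Spec_beforeAndAfterPuzzles (phrases : List String) (out : List String) : Prop :=
  out = beforeAndAfterPuzzles_alt phrases
instance (phrases : List String) (out : List String) : Decidable (Spec_beforeAndAfterPuzzles phrases out) := by
  unfold Spec_beforeAndAfterPuzzles; infer_instance

-- ===== CLAIM (what is proved, stated in full; the proofs are below) =====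
def Claim_equal_beforeAndAfterPuzzles : Prop := ∀ (phrases : List String), Dom_beforeAndAfterPuzzles phrases → Pre_beforeAndAfterPuzzles phrases → Spec_beforeAndAfterPuzzles phrases (beforeAndAfterPuzzles phrases)

-- ===== LEMMAS AND PROOFS =====

-- proof-side names for the pieces of the two ports
def pvE (phrases : List String) : List (Int × String) := PySem.List.enumerate phrases
def pvFw (p : Int × String) : String := (PySem.Str.split₀ p.2).headD ""
def pvFm (p : Int × String) : String := PySem.Str.join " " ((PySem.Str.split₀ p.2).drop 1)
def pvLw (p : Int × String) : String := (PySem.Str.split₀ p.2).getLastD ""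
def pvLm (p : Int × String) : String := PySem.Str.join " " (PySem.Str.split₀ p.2)

def pvFront (phrases : List String) : PySem.Dict String (List (String × Int)) :=
  (pvE phrases).foldl (fun d p => d.modify (pvFw p) [] (· ++ [(pvFm p, p.1)])) PySem.Dict.empty
def pvBack (phrases : List String) : PySem.Dict String (List (String × Int)) :=
  (pvE phrases).foldl (fun d p => d.modify (pvLw p) [] (· ++ [(pvLm p, p.1)])) PySem.Dict.empty

def pvRetA (phrases : List String) : PySem.Set String :=
  (pvBack phrases).keys.foldl (fun ret back_word =>
      ((pvBack phrases).getD back_word []).foldl (fun (ret : PySem.Set String) bp =>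
        ((pvFront phrases).getD back_word []).foldl (fun (ret : PySem.Set String) fp =>
          if bp.2 ≠ fp.2 then
            (if fp.1 = "" then ret.add bp.1 else ret.add (bp.1 ++ " " ++ fp.1))
          else ret) ret) ret)
    PySem.Set.empty

def pvRetB (phrases : List String) : PySem.Set String :=
  (PySem.List.enumerate (phrases.map PySem.Str.split₀)).foldl (fun res p =>
      (PySem.List.enumerate (phrases.map PySem.Str.split₀)).foldl (fun (res : PySem.Set String) q =>
        if p.1 ≠ q.1 ∧ p.2.getLastD "" = q.2.headD "" then
          res.add (PySem.Str.join " " (p.2 ++ q.2.drop 1))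
        else res) res)
    PySem.Set.empty

lemma pvA_eq (phrases : List String) :
    beforeAndAfterPuzzles phrases = PySem.List.sorted (pvRetA phrases) id := by
  have h := PySem.List.foldl_prod_mk
    (fun (d : PySem.Dict String (List (String × Int))) (p : Int × String) =>
      d.modify ((PySem.Str.split₀ p.2).headD "") []
        (· ++ [(PySem.Str.join " " ((PySem.Str.split₀ p.2).drop 1), p.1)]))
    (fun (d : PySem.Dict String (List (String × Int))) (p : Int × String) =>
      d.modify ((PySem.Str.split₀ p.2).getLastD "") []
        (· ++ [(PySem.Str.join " " (PySem.Str.split₀ p.2), p.1)]))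
    (PySem.List.enumerate phrases) PySem.Dict.empty PySem.Dict.empty
  unfold beforeAndAfterPuzzles pvRetA pvFront pvBack pvE pvFw pvFm pvLw pvLm
  simp only [h]

lemma pvB_eq (phrases : List String) :
    beforeAndAfterPuzzles_alt phrases = PySem.List.sorted (pvRetB phrases) id := rfl

-- generic membership/nodup transport through a foldl building a set
lemma pv_mem_foldl {α β : Type} (step : List α → β → List α) (P : β → α → Prop)
    (h : ∀ s b x, x ∈ step s b ↔ x ∈ s ∨ P b x) :
    ∀ (l : List β) (s0 : List α) (x : α), x ∈ l.foldl step s0 ↔ x ∈ s0 ∨ ∃ b ∈ l, P b x := by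
  intro l
  induction l with
  | nil => simp
  | cons b l ih =>
    intro s0 x
    simp [List.foldl_cons, ih, h]
    tauto

lemma pv_nodup_foldl {α β : Type} (step : List α → β → List α)
    (h : ∀ s b, s.Nodup → (step s b).Nodup) :
    ∀ (l : List β) (s0 : List α), s0.Nodup → (l.foldl step s0).Nodup := by
  intro l
  induction l with
  | nil => exact fun _ h => h
  | cons b l ih => intro s0 hs; exact ih _ (h _ _ hs)

-- words produced by split() are never empty
lemma pv_split_go_ne_nil (s : List Char) : ∀ (cur : List Char) (acc : List (List Char)),
    (∀ w ∈ acc, w ≠ []) → ∀ w ∈ PySem.Chars.split₀.go s cur acc, w ≠ [] := by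
  induction s with
  | nil =>
    intro cur acc hacc w hw
    unfold PySem.Chars.split₀.go at hw
    split at hw
    · exact hacc w (List.mem_reverse.1 hw)
    · rcases List.mem_cons.1 (List.mem_reverse.1 hw) with h | h
      · next hne => subst h; simpa using (by simpa [List.isEmpty_iff] using hne : cur ≠ [])
      · exact hacc w h
  | cons c rest ih =>
    intro cur acc hacc w hw
    unfold PySem.Chars.split₀.go at hw
    split at hw
    · split at hw
      · exact ih [] acc hacc w hw
      · next hne =>
        refine ih [] _ ?_ w hw
        intro v hv
        rcases List.mem_cons.1 hv with h | h
        · subst h; simpa using (by simpa [List.isEmpty_iff] using hne : cur ≠ [])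
        · exact hacc v h
    · exact ih (c :: cur) acc hacc w hw

lemma pv_split₀_ne_nil (s : String) : ∀ w ∈ PySem.Str.split₀ s, w ≠ "" := by
  intro w hw he
  have h1 : w.toList ∈ List.map String.toList (PySem.Str.split₀ s) := List.mem_map_of_mem hw
  rw [PySem.Str.split₀_map_toList] at h1
  have := pv_split_go_ne_nil s.toList [] [] (by simp) w.toList h1
  subst he
  exact this rfl

lemma pv_join_ne_nil (sep : List Char) (c : List (List Char)) (hc : c ≠ [])
    (hw : ∀ w ∈ c, w ≠ []) : PySem.Chars.join sep c ≠ [] := by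
  match c with
  | [p] => simpa [PySem.Chars.join_singleton] using hw p (by simp)
  | p :: q :: rest =>
    rw [PySem.Chars.join_cons_cons]
    have := hw p (by simp)
    simp [this]

lemma pv_join_append_chars (sep : List Char) (a c : List (List Char)) (ha : a ≠ []) (hc : c ≠ []) :
    PySem.Chars.join sep (a ++ c) = PySem.Chars.join sep a ++ sep ++ PySem.Chars.join sep c := by
  induction a with
  | nil => simp at ha
  | cons x a iha =>
    match a with
    | [] =>
      match c with
      | y :: c' => simp [PySem.Chars.join_singleton, PySem.Chars.join_cons_cons]
    | z :: a' =>
      have h1 : (x :: z :: a') ++ c = x :: z :: (a' ++ c) := rfl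
      rw [h1, PySem.Chars.join_cons_cons sep x z (a' ++ c),
        show z :: (a' ++ c) = (z :: a') ++ c from rfl, iha (by simp),
        PySem.Chars.join_cons_cons sep x z a']
      simp [List.append_assoc]

lemma pv_join_empty_iff (c : List String) (hw : ∀ w ∈ c, w ≠ "") :
    (PySem.Str.join " " c = "") ↔ c = [] := by
  constructor
  · intro h
    by_contra hc
    have h2 : PySem.Chars.join " ".toList (c.map String.toList) ≠ [] := by
      refine pv_join_ne_nil _ _ (by simpa using hc) ?_
      intro w hww
      rcases List.mem_map.1 hww with ⟨v, hv, rfl⟩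
      simpa using fun hE => hw v hv (String.toList_inj.mp (by simpa using hE))
    exact h2 (by rw [← PySem.Str.toList_join, h]; rfl)
  · rintro rfl
    apply String.toList_inj.mp
    rw [PySem.Str.toList_join]
    simp [PySem.Chars.join_nil]

-- A's two-branch combination equals B's single join over the concatenation
lemma pv_join_append (a c : List String) (ha : a ≠ []) (hc : ∀ w ∈ c, w ≠ "") :
    (if PySem.Str.join " " c = "" then PySem.Str.join " " a
     else PySem.Str.join " " a ++ " " ++ PySem.Str.join " " c)
      = PySem.Str.join " " (a ++ c) := by
  rcases Decidable.eq_or_ne c [] with rfl | hcne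
  · simp [pv_join_empty_iff]
  · rw [if_neg (by simpa [pv_join_empty_iff c hc] using hcne)]
    apply String.toList_inj.mp
    simp only [String.toList_append, PySem.Str.toList_join, List.map_append]
    rw [pv_join_append_chars " ".toList _ _ (by simpa using ha) (by simpa using hcne)]

lemma pv_enumerate_map {α β : Type} (f : α → β) (l : List α) (k : Int) :
    PySem.List.enumerate (l.map f) k = (PySem.List.enumerate l k).map (fun p => (p.1, f p.2)) := by
  induction l generalizing k with
  | nil => rfl
  | cons x t ih => simp [PySem.List.enumerate, ih]

lemma pv_mem_enumerate {α : Type} (l : List α) (k : Int) (p : Int × α)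
    (hp : p ∈ PySem.List.enumerate l k) : p.2 ∈ l := by
  induction l generalizing k with
  | nil => simp [PySem.List.enumerate] at hp
  | cons x t ih =>
    rcases List.mem_cons.1 (by simpa [PySem.List.enumerate] using hp) with h | h
    · subst h; simp
    · exact List.mem_cons_of_mem _ (ih _ h)

-- the dict tables of port A, characterised
lemma pv_getD_front (phrases : List String) (w : String) :
    (pvFront phrases).getD w [] =
      ((((pvE phrases).map (fun p => (pvFw p, (pvFm p, p.1)))).filter
        (fun q => q.1 == w)).map (fun q => q.2)) := by
  have h := PySem.Dict.getD_foldl_modify_append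
      ((pvE phrases).map (fun p => (pvFw p, (pvFm p, p.1)))) (PySem.Dict.empty) w
  rw [List.foldl_map] at h
  simpa [pvFront] using h

lemma pv_getD_back (phrases : List String) (w : String) :
    (pvBack phrases).getD w [] =
      ((((pvE phrases).map (fun p => (pvLw p, (pvLm p, p.1)))).filter
        (fun q => q.1 == w)).map (fun q => q.2)) := by
  have h := PySem.Dict.getD_foldl_modify_append
      ((pvE phrases).map (fun p => (pvLw p, (pvLm p, p.1)))) (PySem.Dict.empty) w
  rw [List.foldl_map] at h
  simpa [pvBack] using h

lemma pv_keys_back (phrases : List String) :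
    (pvBack phrases).keys = PySem.Set.update ([] : List String) ((pvE phrases).map pvLw) :=
  PySem.Dict.keys_foldl_modify_key (pvE phrases) pvLw []
    (fun _ p => (· ++ [(pvLm p, p.1)])) PySem.Dict.empty

-- the common characterisation of both result sets
def pvCond (phrases : List String) (x : String) : Prop :=
  ∃ p ∈ pvE phrases, ∃ q ∈ pvE phrases, p.1 ≠ q.1 ∧
    (PySem.Str.split₀ p.2).getLastD "" = (PySem.Str.split₀ q.2).headD "" ∧
    x = PySem.Str.join " " (PySem.Str.split₀ p.2 ++ (PySem.Str.split₀ q.2).drop 1)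

lemma pv_mem_keysBack (phrases : List String) (w : String) :
    w ∈ (pvBack phrases).keys ↔ ∃ p ∈ pvE phrases, pvLw p = w := by
  rw [pv_keys_back, PySem.Set.mem_update]
  simp [List.mem_map]

lemma pv_mem_backFor (phrases : List String) (w : String) (bp : String × Int) :
    bp ∈ (pvBack phrases).getD w [] ↔
      ∃ p ∈ pvE phrases, pvLw p = w ∧ bp = (pvLm p, p.1) := by
  rw [pv_getD_back]
  simp only [List.mem_map, List.mem_filter, beq_iff_eq]
  constructor
  · rintro ⟨q, ⟨⟨p, hp, rfl⟩, hw⟩, rfl⟩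
    exact ⟨p, hp, hw, rfl⟩
  · rintro ⟨p, hp, hw, rfl⟩
    exact ⟨(pvLw p, (pvLm p, p.1)), ⟨⟨p, hp, rfl⟩, hw⟩, rfl⟩

lemma pv_mem_frontFor (phrases : List String) (w : String) (fp : String × Int) :
    fp ∈ (pvFront phrases).getD w [] ↔
      ∃ p ∈ pvE phrases, pvFw p = w ∧ fp = (pvFm p, p.1) := by
  rw [pv_getD_front]
  simp only [List.mem_map, List.mem_filter, beq_iff_eq]
  constructor
  · rintro ⟨q, ⟨⟨p, hp, rfl⟩, hw⟩, rfl⟩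
    exact ⟨p, hp, hw, rfl⟩
  · rintro ⟨p, hp, hw, rfl⟩
    exact ⟨(pvFw p, (pvFm p, p.1)), ⟨⟨p, hp, rfl⟩, hw⟩, rfl⟩

lemma pv_memB (phrases : List String) (x : String) :
    x ∈ pvRetB phrases ↔ pvCond phrases x := by
  have hinner : ∀ (s : PySem.Set String) (p : Int × List String) (x : String),
      x ∈ (PySem.List.enumerate (phrases.map PySem.Str.split₀)).foldl (fun (res : PySem.Set String) q =>
          if p.1 ≠ q.1 ∧ p.2.getLastD "" = q.2.headD "" then
            res.add (PySem.Str.join " " (p.2 ++ q.2.drop 1)) else res) s ↔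
        x ∈ s ∨ ∃ q ∈ PySem.List.enumerate (phrases.map PySem.Str.split₀),
          (p.1 ≠ q.1 ∧ p.2.getLastD "" = q.2.headD "") ∧
            x = PySem.Str.join " " (p.2 ++ q.2.drop 1) := by
    intro s p x
    refine pv_mem_foldl _
      (fun (q : Int × List String) (y : String) => (p.1 ≠ q.1 ∧ p.2.getLastD "" = q.2.headD "") ∧
        y = PySem.Str.join " " (p.2 ++ q.2.drop 1)) ?_ _ _ _
    intro s q y
    split_ifs with hq
    · rw [PySem.Set.mem_add]; tauto
    · tauto
  have houter := pv_mem_foldl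
      (fun (res : PySem.Set String) (p : Int × List String) =>
        (PySem.List.enumerate (phrases.map PySem.Str.split₀)).foldl (fun (res : PySem.Set String) q =>
          if p.1 ≠ q.1 ∧ p.2.getLastD "" = q.2.headD "" then
            res.add (PySem.Str.join " " (p.2 ++ q.2.drop 1)) else res) res)
      (fun p x => ∃ q ∈ PySem.List.enumerate (phrases.map PySem.Str.split₀),
          (p.1 ≠ q.1 ∧ p.2.getLastD "" = q.2.headD "") ∧
            x = PySem.Str.join " " (p.2 ++ q.2.drop 1))
      hinner (PySem.List.enumerate (phrases.map PySem.Str.split₀)) PySem.Set.empty x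
  rw [pvRetB, houter]
  simp only [pv_enumerate_map, List.mem_map, PySem.Set.empty, List.not_mem_nil, false_or]
  unfold pvCond pvE
  constructor
  · rintro ⟨p, ⟨p0, hp0, rfl⟩, q, ⟨q0, hq0, rfl⟩, ⟨hne, hmatch⟩, rfl⟩
    exact ⟨p0, hp0, q0, hq0, hne, hmatch, rfl⟩
  · rintro ⟨p0, hp0, q0, hq0, hne, hmatch, rfl⟩
    exact ⟨_, ⟨p0, hp0, rfl⟩, _, ⟨q0, hq0, rfl⟩, ⟨hne, hmatch⟩, rfl⟩

lemma pv_memA (phrases : List String) (hpre : Pre_beforeAndAfterPuzzles phrases) (x : String) :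
    x ∈ pvRetA phrases ↔ pvCond phrases x := by
  have hinner2 : ∀ (bp : String × Int) (w : String) (s : PySem.Set String) (x : String),
      x ∈ ((pvFront phrases).getD w []).foldl (fun (ret : PySem.Set String) fp =>
          if bp.2 ≠ fp.2 then
            (if fp.1 = "" then ret.add bp.1 else ret.add (bp.1 ++ " " ++ fp.1))
          else ret) s ↔
        x ∈ s ∨ ∃ fp ∈ (pvFront phrases).getD w [], bp.2 ≠ fp.2 ∧
          x = (if fp.1 = "" then bp.1 else bp.1 ++ " " ++ fp.1) := by
    intro bp w s x
    refine pv_mem_foldl _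
      (fun (fp : String × Int) (y : String) => bp.2 ≠ fp.2 ∧ y = (if fp.1 = "" then bp.1 else bp.1 ++ " " ++ fp.1)) ?_ _ _ _
    intro s fp y
    split_ifs with h1 h2
    · rw [PySem.Set.mem_add]; simp only [if_pos h2]; tauto
    · rw [PySem.Set.mem_add]; simp only [if_neg h2]; tauto
    · simp only []; tauto
  have hmid : ∀ (s : PySem.Set String) (w : String) (x : String),
      x ∈ ((pvBack phrases).getD w []).foldl (fun (ret : PySem.Set String) bp =>
          ((pvFront phrases).getD w []).foldl (fun (ret : PySem.Set String) fp =>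
            if bp.2 ≠ fp.2 then
              (if fp.1 = "" then ret.add bp.1 else ret.add (bp.1 ++ " " ++ fp.1))
            else ret) ret) s ↔
        x ∈ s ∨ ∃ bp ∈ (pvBack phrases).getD w [], ∃ fp ∈ (pvFront phrases).getD w [],
          bp.2 ≠ fp.2 ∧ x = (if fp.1 = "" then bp.1 else bp.1 ++ " " ++ fp.1) := by
    intro s w x
    refine pv_mem_foldl _
      (fun (bp : String × Int) (y : String) => ∃ fp ∈ (pvFront phrases).getD w [], bp.2 ≠ fp.2 ∧
        y = (if fp.1 = "" then bp.1 else bp.1 ++ " " ++ fp.1)) ?_ _ _ _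
    intro s bp y
    exact hinner2 bp w s y
  have houter := pv_mem_foldl
      (fun (ret : PySem.Set String) (back_word : String) =>
        ((pvBack phrases).getD back_word []).foldl (fun (ret : PySem.Set String) bp =>
          ((pvFront phrases).getD back_word []).foldl (fun (ret : PySem.Set String) fp =>
            if bp.2 ≠ fp.2 then
              (if fp.1 = "" then ret.add bp.1 else ret.add (bp.1 ++ " " ++ fp.1))
            else ret) ret) ret)
      (fun w x => ∃ bp ∈ (pvBack phrases).getD w [], ∃ fp ∈ (pvFront phrases).getD w [],
          bp.2 ≠ fp.2 ∧ x = (if fp.1 = "" then bp.1 else bp.1 ++ " " ++ fp.1))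
      (fun s w y => hmid s w y) (pvBack phrases).keys PySem.Set.empty x
  rw [pvRetA, houter]
  simp only [pv_mem_keysBack, pv_mem_backFor, pv_mem_frontFor, PySem.Set.empty,
    List.not_mem_nil, false_or]
  constructor
  · rintro ⟨w, ⟨p1, hp1, hw1⟩, bp, ⟨pb, hpb, hlwpb, rfl⟩, fp, ⟨qf, hqf, hfwqf, rfl⟩, hne, rfl⟩
    have hbs : PySem.Str.split₀ pb.2 ≠ [] := hpre pb.2 (pv_mem_enumerate _ _ _ hpb)
    have hqs : PySem.Str.split₀ qf.2 ≠ [] := hpre qf.2 (pv_mem_enumerate _ _ _ hqf)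
    refine ⟨pb, hpb, qf, hqf, hne, by rw [← pvLw, hlwpb, ← hfwqf, pvFw], ?_⟩
    rw [pvLm, pvFm, pv_join_append _ _ hbs
      (fun v hv => pv_split₀_ne_nil qf.2 v (List.mem_of_mem_drop hv))]
  · rintro ⟨pb, hpb, qf, hqf, hne, hmatch, rfl⟩
    have hbs : PySem.Str.split₀ pb.2 ≠ [] := hpre pb.2 (pv_mem_enumerate _ _ _ hpb)
    have hqs : PySem.Str.split₀ qf.2 ≠ [] := hpre qf.2 (pv_mem_enumerate _ _ _ hqf)
    refine ⟨pvLw pb, ⟨pb, hpb, rfl⟩, (pvLm pb, pb.1), ⟨pb, hpb, rfl, rfl⟩,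
      (pvFm qf, qf.1), ⟨qf, hqf, ?_, rfl⟩, hne, ?_⟩
    · rw [pvFw, pvLw, hmatch]
    · rw [pvLm, pvFm, pv_join_append _ _ hbs
        (fun v hv => pv_split₀_ne_nil qf.2 v (List.mem_of_mem_drop hv))]

lemma pv_nodupA (phrases : List String) : (pvRetA phrases).Nodup := by
  refine pv_nodup_foldl _ ?_ _ _ (List.nodup_nil)
  intro s w hs
  refine pv_nodup_foldl _ ?_ _ _ hs
  intro s bp hs2
  refine pv_nodup_foldl _ ?_ _ _ hs2
  intro s fp hs3
  split_ifs <;> first | exact PySem.Set.nodup_add _ _ hs3 | exact hs3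

lemma pv_nodupB (phrases : List String) : (pvRetB phrases).Nodup := by
  refine pv_nodup_foldl _ ?_ _ _ (List.nodup_nil)
  intro s p hs
  refine pv_nodup_foldl _ ?_ _ _ hs
  intro s q hs2
  split_ifs <;> first | exact PySem.Set.nodup_add _ _ hs2 | exact hs2

-- ===== VERDICT (by name: the statement is the Claim_ definition above) =====
theorem beforeAndAfterPuzzles_spec : Claim_equal_beforeAndAfterPuzzles := by
  intro phrases _ hpre
  show _ = _
  rw [pvA_eq, pvB_eq]
  have hperm : (PySem.List.sorted (pvRetB phrases) id).Perm (pvRetA phrases) := by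
    refine (PySem.List.sorted_perm _ _ _).trans ?_
    exact ((List.perm_ext_iff_of_nodup (pv_nodupB phrases) (pv_nodupA phrases)).2
      (fun a => (pv_memB phrases a).trans (pv_memA phrases hpre a).symm)).symm.symm
  refine PySem.List.sorted_eq_of_perm_of_pairwise_lt _ _ _ hperm ?_
  have hle := PySem.List.sorted_pairwise (pvRetB phrases) (id (α := String))
  have hnd : (PySem.List.sorted (pvRetB phrases) id).Nodup :=
    ((PySem.List.sorted_perm (pvRetB phrases) id false).nodup_iff).2 (pv_nodupB phrases)
  exact (hle.and hnd).imp (fun h => lt_of_le_of_ne h.1 h.2)
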